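-- pv_equiv track=rewrite | github.com/skygentwu/miniopc-write-report | workspace_KimiClaw/py/create_ppt_integration.py | split_content_by_items
-- ===== SOURCE A (Python) =====
-- def split_content_by_items(content_lines, max_items=13):
--     """按条目数分页，每页最多13个有效条目"""
--     pages = []
--     current_page = []
--     current_count = 0
--
--     for line in content_lines:
--         is_content = line.strip() != ''
--
--         if current_count >= max_items and is_content and current_page:
--             pages.append(current_page)
--             current_page = [line]
--             current_count = 1 if is_content else 0
--         else:
--             current_page.append(line)
--             if is_content:
--                 current_count += 1
--
--     if current_page:
--         pages.append(current_page)
--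
--     return pages
-- ===== SOURCE B (Python) =====
-- def split_content_by_items(content_lines, max_items=13):
--     """Paginate by counting content lines: page index is a floor-division of the
--     running content count; empty lines stay with the page of the last content line."""
--     pages = []
--     count = 0
--     for line in content_lines:
--         if line.strip() != '':
--             page_idx = count // max_items
--             count += 1
--         else:
--             page_idx = (count - 1) // max_items if count else 0
--         while len(pages) <= page_idx:
--             pages.append([])
--         pages[page_idx].append(line)
--     return pages
-- ===== Notes on version B (the rewrite author's own statement) =====
-- stated objective: alternative
-- what changed: Replaces the current_page/current_count accumulator with a single running content counter: each line's page index is computed by floor division of the count, pages grow on demand and the line is appended directly into its page.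
-- outside the precondition, e.g. on split_content_by_items(['a'], 0): A returns [['a']], B raises ZeroDivisionError; on split_content_by_items(['a', 'b'], -1): A returns [['a'], ['b']], B returns [['a', 'b']]
import Mathlib
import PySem

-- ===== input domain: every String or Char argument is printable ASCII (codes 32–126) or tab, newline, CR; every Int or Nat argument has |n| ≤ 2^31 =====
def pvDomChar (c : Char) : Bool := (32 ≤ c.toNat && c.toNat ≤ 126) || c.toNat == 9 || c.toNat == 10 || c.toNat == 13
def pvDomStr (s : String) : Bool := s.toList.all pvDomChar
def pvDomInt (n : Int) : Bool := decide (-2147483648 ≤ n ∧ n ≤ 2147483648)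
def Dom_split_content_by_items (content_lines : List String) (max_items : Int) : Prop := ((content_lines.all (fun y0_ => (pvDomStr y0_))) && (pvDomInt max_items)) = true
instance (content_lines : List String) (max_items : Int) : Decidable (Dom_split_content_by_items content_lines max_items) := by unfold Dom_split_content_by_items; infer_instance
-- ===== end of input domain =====

-- B replaces A's current_page/current_count accumulator by a running content counter whose
-- floor division gives each line's page index directly (alternative decomposition, same cost).


-- ===== PORT A =====
def pvStepA (max_items : Int) : (List (List String) × List String × Int) → String → (List (List String) × List String × Int) :=
  fun (st : List (List String) × List String × Int) line =>
    let pages := st.1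
    let current_page := st.2.1
    let current_count := st.2.2
    let is_content : Bool := PySem.Str.strip line != ""
    if max_items ≤ current_count ∧ is_content = true ∧ current_page ≠ [] then
      (pages ++ [current_page], [line], if is_content then 1 else 0)
    else
      (pages, current_page ++ [line], if is_content then current_count + 1 else current_count)

def split_content_by_items (content_lines : List String) (max_items : Int) : List (List String) :=
  let st := content_lines.foldl (pvStepA max_items) ([], [], 0)
  if st.2.1 ≠ [] then st.1 ++ [st.2.1] else st.1

-- ===== PORT B =====
-- while len(pages) <= page_idx: pages.append([])
def pvGrowTo (pages : List (List String)) (page_idx : Int) : List (List String) :=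
  if (pages.length : Int) ≤ page_idx then pvGrowTo (pages ++ [[]]) page_idx else pages
termination_by (page_idx + 1 - (pages.length : Int)).toNat
decreasing_by simp; omega

def pvStepB (max_items : Int) : (List (List String) × Int) → String → (List (List String) × Int) :=
  fun (st : List (List String) × Int) line =>
    let pages := st.1
    let count := st.2
    let pc : Int × Int :=
      if PySem.Str.strip line != "" then (PySem.Int.floordiv count max_items, count + 1)
      else ((if count ≠ 0 then PySem.Int.floordiv (count - 1) max_items else 0), count)
    let pages' := pvGrowTo pages pc.1
    -- pages[page_idx].append(line): exact for 0 ≤ page_idx, which Pre_ (1 ≤ max_items) guarantees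
    (pages'.set pc.1.toNat (pages'.getD pc.1.toNat [] ++ [line]), pc.2)

def split_content_by_items_alt (content_lines : List String) (max_items : Int) : List (List String) :=
  (content_lines.foldl (pvStepB max_items) ([], 0)).1

-- ===== PRECONDITION & SPEC =====
-- Pre_ excludes non-positive max_items, outside pagination's natural domain: there B's floor
-- division raises ZeroDivisionError (max_items = 0) or yields negative page indices.
def Pre_split_content_by_items (content_lines : List String) (max_items : Int) : Prop := 1 ≤ max_items
instance (content_lines : List String) (max_items : Int) : Decidable (Pre_split_content_by_items content_lines max_items) := by unfold Pre_split_content_by_items; infer_instance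
def pvWitness_split_content_by_items : List String × Int := (["a", "", "b", "c"], 2)

def Spec_split_content_by_items (content_lines : List String) (max_items : Int) (out : List (List String)) : Prop := out = split_content_by_items_alt content_lines max_items
instance (content_lines : List String) (max_items : Int) (out : List (List String)) : Decidable (Spec_split_content_by_items content_lines max_items out) := by unfold Spec_split_content_by_items; infer_instance

-- ===== CLAIM (what is proved, stated in full; the proofs are below) =====
def Claim_equal_split_content_by_items : Prop := ∀ (content_lines : List String) (max_items : Int), Dom_split_content_by_items content_lines max_items → Pre_split_content_by_items content_lines max_items → Spec_split_content_by_items content_lines max_items (split_content_by_items content_lines max_items)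

-- ===== LEMMAS AND PROOFS =====

lemma pv_fdiv_mul_add (m q r : Int) (hm : 1 ≤ m) (h0 : 0 ≤ r) (h1 : r < m) :
    PySem.Int.floordiv (m * q + r) m = q := by
  rw [PySem.Int.floordiv_eq_ediv_of_pos (by omega)]
  have h : m * q + r = r + q * m := by ring
  rw [h, Int.add_mul_ediv_right r q (by omega), Int.ediv_eq_zero_of_lt h0 h1, zero_add]

lemma pvGrowTo_id (pages : List (List String)) (idx : Int) (h : idx < (pages.length : Int)) :
    pvGrowTo pages idx = pages := by
  rw [pvGrowTo]; simp [not_le.mpr h]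

lemma pvGrowTo_one (pages : List (List String)) (idx : Int) (h : (pages.length : Int) = idx) :
    pvGrowTo pages idx = pages ++ [[]] := by
  rw [pvGrowTo]
  simp only [if_pos (le_of_eq h)]
  apply pvGrowTo_id
  simp; omega

/-- B's loop body when the target page already exists (index `l.length`, last page `x`). -/
lemma pv_stepB_app (m : Int) (l : List (List String)) (x : List String) (count count' : Int)
    (line : String)
    (h1 : (if (PySem.Str.strip line != "") = true then (PySem.Int.floordiv count m, count + 1)
           else ((if count ≠ 0 then PySem.Int.floordiv (count - 1) m else 0), count))
          = ((l.length : Int), count')) :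
    pvStepB m (l ++ [x], count) line = (l ++ [x ++ [line]], count') := by
  simp only [pvStepB, h1]
  rw [pvGrowTo_id _ _ (by simp)]
  simp

/-- B's loop body when a fresh page must be opened (index `l.length`). -/
lemma pv_stepB_new (m : Int) (l : List (List String)) (count count' : Int) (line : String)
    (h1 : (if (PySem.Str.strip line != "") = true then (PySem.Int.floordiv count m, count + 1)
           else ((if count ≠ 0 then PySem.Int.floordiv (count - 1) m else 0), count))
          = ((l.length : Int), count')) :
    pvStepB m (l, count) line = (l ++ [[line]], count') := by
  simp only [pvStepB, h1]
  rw [pvGrowTo_one _ _ (by simp)]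
  simp

lemma pv_key (max_items : Int) (hm : 1 ≤ max_items) :
    ∀ (lines : List String) (pages : List (List String)) (cur : List String) (cnt count : Int),
      count = max_items * pages.length + cnt →
      0 ≤ cnt → cnt ≤ max_items →
      (cur = [] → pages = [] ∧ cnt = 0) →
      (cnt = 0 → pages = []) →
      (let st := List.foldl (pvStepA max_items) (pages, cur, cnt) lines
       if st.2.1 ≠ [] then st.1 ++ [st.2.1] else st.1) =
      (List.foldl (pvStepB max_items) (pages ++ (if cur = [] then [] else [cur]), count) lines).1 := by
  intro lines
  induction lines with
  | nil =>
    intro pages cur cnt count hcount h0 h1 hcur hcnt0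
    by_cases h : cur = [] <;> simp [h]
  | cons line rest ih =>
    intro pages cur cnt count hcount h0 h1 hcur hcnt0
    have hlen : (0:Int) ≤ max_items * pages.length :=
      mul_nonneg (by omega) (Int.natCast_nonneg _)
    simp only [List.foldl_cons]
    by_cases hc : PySem.Str.strip line = ""
    · -- empty line: A appends to the current page, B's index is (count-1)//m (or 0)
      have hb : (PySem.Str.strip line != "") = false := by simp [hc]
      have hA : pvStepA max_items (pages, cur, cnt) line = (pages, cur ++ [line], cnt) := by
        simp [pvStepA, hb]
      rw [hA]
      by_cases hz : count = 0
      · have hcnt : cnt = 0 := by omega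
        have hp : pages = [] := hcnt0 hcnt
        subst hp; subst hcnt; subst hz
        by_cases hcur0 : cur = []
        · subst hcur0
          rw [show ([] : List (List String)) ++ (if ([] : List String) = [] then [] else [[]]) = [] by simp]
          rw [pv_stepB_new max_items [] 0 0 line (by simp [hb])]
          have := ih [] ([] ++ [line]) 0 0 (by simp) (by omega) (by omega) (by simp) (by simp)
          simpa using this
        · rw [show ([] : List (List String)) ++ (if cur = [] then [] else [cur]) = [] ++ [cur] by simp [hcur0]]
          rw [pv_stepB_app max_items [] cur 0 0 line (by simp [hb])]
          have := ih [] (cur ++ [line]) 0 0 (by simp) (by omega) (by omega)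
            (by simp [hcur0]) (by simp)
          simpa [hcur0] using this
      · -- count ≠ 0 ⇒ cnt > 0 ⇒ cur ≠ []
        have hcntpos : 0 < cnt := by
          rcases lt_or_eq_of_le h0 with h | h
          · exact h
          · exact absurd hcount (by simp [hcnt0 h.symm, ← h] at hz ⊢; omega)
        have hcur0 : cur ≠ [] := fun h => by have := (hcur h).2; omega
        have hidx : PySem.Int.floordiv (count - 1) max_items = ((pages.length : Nat) : Int) := by
          have : count - 1 = max_items * ((pages.length : Nat) : Int) + (cnt - 1) := by omega
          rw [this]; exact pv_fdiv_mul_add _ _ _ hm (by omega) (by omega)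
        rw [show pages ++ (if cur = [] then [] else [cur]) = pages ++ [cur] by simp [hcur0]]
        rw [pv_stepB_app max_items pages cur count count line (by simp [hb, hz, hidx])]
        have := ih pages (cur ++ [line]) cnt count hcount h0 h1 (by simp) hcnt0
        simpa [hcur0] using this
    · -- content line
      have hb : (PySem.Str.strip line != "") = true := by simp [hc]
      by_cases hbr : max_items ≤ cnt ∧ cur ≠ []
      · -- page break: cnt = max_items, a fresh page is opened
        have hcnt : cnt = max_items := le_antisymm h1 hbr.1
        have hA : pvStepA max_items (pages, cur, cnt) line = (pages ++ [cur], [line], 1) := by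
          simp [pvStepA, hb, hbr.1, hbr.2]
        rw [hA]
        have hidx : PySem.Int.floordiv count max_items = (((pages ++ [cur]).length : Nat) : Int) := by
          have : count = max_items * (((pages ++ [cur]).length : Nat) : Int) + 0 := by
            simp; rw [hcount, hcnt]; ring
          rw [this]; exact pv_fdiv_mul_add _ _ _ hm le_rfl (by omega)
        rw [show pages ++ (if cur = [] then [] else [cur]) = pages ++ [cur] by simp [hbr.2]]
        rw [pv_stepB_new max_items (pages ++ [cur]) count (count + 1) line (by simp [hb, hidx])]
        have := ih (pages ++ [cur]) [line] 1 (count + 1)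
          (by simp only [List.length_append, List.length_cons, List.length_nil]; push_cast;
              rw [hcount, hcnt]; ring) (by omega) hm (by simp) (by omega)
        simpa using this
      · -- no break: the line joins the current page
        have hcond : ¬ (max_items ≤ cnt ∧ (PySem.Str.strip line != "") = true ∧ cur ≠ []) :=
          fun h => hbr ⟨h.1, h.2.2⟩
        have hA : pvStepA max_items (pages, cur, cnt) line
            = (pages, cur ++ [line], cnt + 1) := by
          simp only [pvStepA, if_neg hcond]
          simp [hb]
        rw [hA]
        by_cases hcur0 : cur = []
        · have hp : pages = [] := (hcur hcur0).1
          have hcnt : cnt = 0 := (hcur hcur0).2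
          subst hp; subst hcur0
          have hz : count = 0 := by simpa [hcnt] using hcount
          have hidx : PySem.Int.floordiv count max_items = ((([] : List (List String)).length : Nat) : Int) := by
            rw [show count = max_items * ((([] : List (List String)).length : Nat) : Int) + 0 by simp [hz]]
            exact pv_fdiv_mul_add _ _ _ hm le_rfl (by omega)
          rw [show ([] : List (List String)) ++ (if ([] : List String) = [] then [] else [[]]) = [] by simp]
          rw [pv_stepB_new max_items [] count (count + 1) line (by simp [hb, hidx])]
          have := ih [] ([] ++ [line]) (cnt + 1) (count + 1)
            (by simp [hz, hcnt]) (by omega) (by omega) (by simp) (by omega)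
          simpa using this
        · have hlt : cnt < max_items := by
            rcases not_and_or.mp hbr with h | h
            · omega
            · exact absurd hcur0 (by simpa using h)
          have hidx : PySem.Int.floordiv count max_items = ((pages.length : Nat) : Int) := by
            rw [show count = max_items * ((pages.length : Nat) : Int) + cnt from hcount]
            exact pv_fdiv_mul_add _ _ _ hm h0 hlt
          rw [show pages ++ (if cur = [] then [] else [cur]) = pages ++ [cur] by simp [hcur0]]
          rw [pv_stepB_app max_items pages cur count (count + 1) line (by simp [hb, hidx])]
          have := ih pages (cur ++ [line]) (cnt + 1) (count + 1)
            (by omega) (by omega) (by omega) (by simp) (by omega)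
          simpa [hcur0] using this

-- ===== VERDICT (by name: the statement is the Claim_ definition above) =====
theorem split_content_by_items_spec : Claim_equal_split_content_by_items := by
  intro content_lines max_items _ hpre
  have hm : (1:Int) ≤ max_items := hpre
  unfold Spec_split_content_by_items split_content_by_items split_content_by_items_alt
  simpa using pv_key max_items hm content_lines [] [] 0 0 (by simp) (by omega) (by omega) (by simp) (by simp)
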